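-- pv_equiv track=rewrite | github.com/aijingsun6/leetcode-py | dp/p1745.py | checkPartitioning
-- ===== SOURCE A (Python) =====
-- def checkPartitioning(s: str) -> bool:
--     n = len(s)
--     dp = []  # dp[i][j] [i,j)
--     for i in range(n):
--         dp.append([False] * (n + 1))
--         dp[i][i+1] = True
--
--     start_acc = []
--     end_acc = []
--     for size in range(1, n + 1):
--         for start in range(0, n):
--             end = start + size
--             if end > n:
--                 continue
--             if size == 1:
--                 dp[start][end] = True
--             elif size == 2:
--                 dp[start][end] = s[start] == s[end - 1]
--             else:
--                 dp[start][end] = s[start] == s[end - 1] and dp[start + 1][end - 1]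
--             if start == 0 and dp[start][end]:
--                 start_acc.append(end)
--             if end == n and dp[start][end]:
--                 end_acc.append(start)
--
--     for start in start_acc:
--         for end in end_acc:
--             if dp[start][end]:
--                 return True
--     return False
-- ===== SOURCE B (Python) =====
-- def checkPartitioning(s: str) -> bool:
--     n = len(s)
--
--     def is_pal(t):
--         return t == t[::-1]
--
--     return any(is_pal(s[:i]) and is_pal(s[i:j]) and is_pal(s[j:])
--                for i in range(1, n - 1)
--                for j in range(i + 1, n))
-- ===== Notes on version B (the rewrite author's own statement) =====
-- stated objective: simpler
-- what changed: Replaces A's length-ordered DP palindrome table with prefix-end/suffix-start accumulator lists and a pair scan by a direct scan over the two cut points that checks each of the three parts for palindromicity by slice reversal.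
import Mathlib
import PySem

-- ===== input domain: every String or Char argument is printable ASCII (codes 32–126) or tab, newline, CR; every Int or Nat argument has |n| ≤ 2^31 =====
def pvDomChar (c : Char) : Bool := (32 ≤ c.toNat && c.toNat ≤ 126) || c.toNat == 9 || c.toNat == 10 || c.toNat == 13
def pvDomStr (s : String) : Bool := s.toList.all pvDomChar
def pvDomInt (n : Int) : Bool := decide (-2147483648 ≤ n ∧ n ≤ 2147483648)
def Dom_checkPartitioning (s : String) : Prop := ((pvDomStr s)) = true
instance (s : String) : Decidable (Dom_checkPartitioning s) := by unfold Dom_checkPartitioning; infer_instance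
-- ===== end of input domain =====

-- B replaces A's length-ordered DP table + prefix/suffix accumulator lists by a direct
-- scan over the two cut points, testing the three parts for palindromicity by reversal
-- (objective: simpler; not faster).

-- ===== PORT A =====
-- one inner-loop body: Python's 'for start in range(0, n):' at a fixed size
def paInner (cs : List Char) (n : Nat) (size : Nat)
    (st : List (List Bool) × List Nat × List Nat) (start : Nat) :
    List (List Bool) × List Nat × List Nat :=
  let e := start + size
  if e > n then st else
  let dp := st.1
  let sa := st.2.1
  let ea := st.2.2
  let v : Bool :=
    if size = 1 then true
    else if size = 2 then cs[start]? == cs[e - 1]?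
    else (cs[start]? == cs[e - 1]?) && ((dp.getD (start + 1) []).getD (e - 1) false)
  let dp' := dp.set start ((dp.getD start []).set e v)
  let sa' := if start = 0 && v then sa ++ [e] else sa
  let ea' := if e = n && v then ea ++ [start] else ea
  (dp', sa', ea')


def checkPartitioning (s : String) : Bool :=
  let cs := s.toList
  let n := cs.length
  let dp0 : List (List Bool) := (List.range n).map (fun i => (List.replicate (n + 1) false).set (i + 1) true)
  let st := (List.range' 1 n).foldl
    (fun st size => (List.range n).foldl (paInner cs n size) st) (dp0, ([] : List Nat), ([] : List Nat))
  st.2.1.any (fun a => st.2.2.any (fun e => ((st.1.getD a []).getD e false)))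

-- ===== PORT B =====
def isPalB (t : List Char) : Bool := t == t.reverse

def checkPartitioning_alt (s : String) : Bool :=
  let cs := s.toList
  let n := cs.length
  (List.range' 1 (n - 2)).any fun i =>
    (List.range' (i + 1) (n - 1 - i)).any fun j =>
      isPalB (cs.take i) && isPalB ((cs.drop i).take (j - i)) && isPalB (cs.drop j)

-- ===== PRECONDITION & SPEC =====
-- declarative "the string splits into three non-empty palindromic parts"
def HasTri (cs : List Char) : Prop :=
  ∃ i ∈ List.range cs.length, ∃ j ∈ List.range cs.length,
    1 ≤ i ∧ i < j ∧
    (cs.take i).reverse = cs.take i ∧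
    ((cs.drop i).take (j - i)).reverse = (cs.drop i).take (j - i) ∧
    (cs.drop j).reverse = cs.drop j

-- Pre_ excludes exactly the inputs on which A raises IndexError: a nonempty palindromic
-- string with no split into three palindromic parts (start_acc then contains n and the
-- final loop reads dp[n]).
def Pre_checkPartitioning (s : String) : Prop :=
  s.toList = [] ∨ s.toList.reverse ≠ s.toList ∨ HasTri s.toList
instance (s : String) : Decidable (Pre_checkPartitioning s) := by
  unfold Pre_checkPartitioning HasTri; infer_instance

def pvWitness_checkPartitioning : String := "aba"

def Spec_checkPartitioning (s : String) (out : Bool) : Prop := out = checkPartitioning_alt s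
instance (s : String) (out : Bool) : Decidable (Spec_checkPartitioning s out) := by
  unfold Spec_checkPartitioning; infer_instance

-- ===== CLAIM (what is proved, stated in full; the proofs are below) =====
def Claim_equal_checkPartitioning : Prop := ∀ (s : String), Dom_checkPartitioning s → Pre_checkPartitioning s → Spec_checkPartitioning s (checkPartitioning s)

-- ===== LEMMAS AND PROOFS =====
def seg (cs : List Char) (i j : Nat) : List Char := (cs.drop i).take (j - i)
def palb (cs : List Char) (i j : Nat) : Bool := isPalB (seg cs i j)

theorem palb_succ (cs : List Char) (i : Nat) : palb cs i (i + 1) = true := by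
  simp only [palb, seg, isPalB, Nat.add_sub_cancel_left]
  cases h' : cs.drop i with
  | nil => simp [h']
  | cons a l => simp [h']

theorem seg_split (cs : List Char) (i j : Nat) (h2 : i + 2 ≤ j) (hn : j ≤ cs.length) :
    seg cs i j = cs[i]'(by omega) :: (seg cs (i + 1) (j - 1) ++ [cs[j-1]'(by omega)]) := by
  have hi : i < cs.length := by omega
  have hm : j - i = (j - 1 - (i + 1)) + 1 + 1 := by omega
  simp only [seg]
  rw [List.drop_eq_getElem_cons hi, hm, List.take_succ_cons, List.take_add_one]
  congr 1
  rw [List.getElem?_drop, show i + 1 + (j - 1 - (i + 1)) = j - 1 by omega,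
    List.getElem?_eq_getElem (show j - 1 < cs.length by omega)]
  rfl

theorem pal_cons_append (a b : Char) (l : List Char) :
    ((a :: (l ++ [b])) == (b :: (l.reverse ++ [a]))) = ((a == b) && (l == l.reverse)) := by
  by_cases hab : a = b
  · subst hab
    by_cases hl : l = l.reverse
    · rw [← hl]; simp
    · have h1 : (l == l.reverse) = false := by simp [hl]
      have h2 : (a :: (l ++ [a]) == a :: (l.reverse ++ [a])) = false := by
        simp only [beq_eq_false_iff_ne, ne_eq, List.cons.injEq, List.append_cancel_right_eq]
        tauto
      simp [h1, h2]
  · have h2 : (a :: (l ++ [b]) == b :: (l.reverse ++ [a])) = false := by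
      simp only [beq_eq_false_iff_ne, ne_eq, List.cons.injEq]
      tauto
    simp [h2, hab]

theorem palb_rec (cs : List Char) (i j : Nat) (h2 : i + 2 ≤ j) (hn : j ≤ cs.length) :
    palb cs i j = ((cs[i]? == cs[j - 1]?) && palb cs (i + 1) (j - 1)) := by
  have hi : i < cs.length := by omega
  have hj : j - 1 < cs.length := by omega
  simp only [palb, isPalB, seg_split cs i j h2 hn,
    List.getElem?_eq_getElem hi, List.getElem?_eq_getElem hj]
  simp only [List.reverse_cons, List.reverse_append, List.reverse_nil,
    List.nil_append, List.cons_append, ← List.append_assoc]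
  rw [pal_cons_append]
  simp

def dval (cs : List Char) (k i j : Nat) : Bool :=
  decide (j = i + 1) || (decide (i < j ∧ j - i ≤ k) && palb cs i j)

def gd (dp : List (List Bool)) (i j : Nat) : Bool := (dp.getD i []).getD j false

def Shape (n : Nat) (dp : List (List Bool)) : Prop :=
  dp.length = n ∧ ∀ r ∈ dp, r.length = n + 1

def dvalMix (cs : List Char) (k m i j : Nat) : Bool :=
  if i < m ∧ j = i + k then dval cs k i j else dval cs (k - 1) i j

theorem row_len (n : Nat) (dp : List (List Bool)) (hs : Shape n dp) (m : Nat) (hm : m < n) :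
    (dp.getD m []).length = n + 1 := by
  have hlen : dp.length = n := hs.1
  have hm' : m < dp.length := by omega
  rw [List.getD_eq_getElem dp [] hm']
  exact hs.2 _ (List.getElem_mem hm')

theorem shape_set (n : Nat) (dp : List (List Bool)) (hs : Shape n dp) (m e : Nat)
    (hm : m < n) (v : Bool) :
    Shape n (dp.set m ((dp.getD m []).set e v)) := by
  constructor
  · simp [hs.1]
  · intro r hr
    rcases List.mem_or_eq_of_mem_set hr with h | h
    · exact hs.2 _ h
    · rw [h, List.length_set]
      exact row_len n dp hs m hm

theorem gd_set (n : Nat) (dp : List (List Bool)) (hs : Shape n dp) (m e : Nat)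
    (hm : m < n) (he : e ≤ n) (v : Bool) (i j : Nat) (hi : i < n) :
    gd (dp.set m ((dp.getD m []).set e v)) i j = if i = m ∧ j = e then v else gd dp i j := by
  have hlen : dp.length = n := hs.1
  have hrow : (dp[m]?.getD []).length = n + 1 := by
    rw [← List.getD_eq_getD_getElem?]; exact row_len n dp hs m hm
  simp only [gd, List.getD_eq_getD_getElem?]
  by_cases him : i = m
  · subst him
    rw [List.getElem?_set_self (by omega), Option.getD_some]
    by_cases hje : j = e
    · subst hje
      rw [List.getElem?_set_self (by omega), Option.getD_some, if_pos ⟨rfl, rfl⟩]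
    · rw [List.getElem?_set_ne (fun h => hje h.symm)]
      simp [hje]
  · rw [List.getElem?_set_ne (fun h => him h.symm)]
    simp [him]

theorem palb_self (cs : List Char) (i : Nat) : palb cs i i = true := by
  simp [palb, seg, isPalB]

theorem v_eq (cs : List Char) (n k m : Nat) (hn : cs.length = n) (hk : 1 ≤ k) (he : m + k ≤ n)
    (dp : List (List Bool)) (hs : Shape n dp)
    (hdp : ∀ i j, i < n → j ≤ n → gd dp i j = dvalMix cs k m i j) :
    (if k = 1 then true
     else if k = 2 then cs[m]? == cs[m + k - 1]?
     else (cs[m]? == cs[m + k - 1]?) && ((dp.getD (m + 1) []).getD (m + k - 1) false)) = palb cs m (m + k) := by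
  by_cases h1 : k = 1
  · subst h1
    rw [if_pos rfl, palb_succ cs m]
  by_cases h2 : k = 2
  · subst h2
    rw [if_neg h1, if_pos rfl, palb_rec cs m (m + 2) (by omega) (by omega)]
    have h3 : m + 2 - 1 = (m + 1) + 1 - 1 := by omega
    rw [h3, Nat.add_sub_cancel, palb_self]
    simp
  · rw [if_neg h1, if_neg h2]
    have hmid : gd dp (m + 1) (m + k - 1) = palb cs (m + 1) (m + k - 1) := by
      rw [hdp (m + 1) (m + k - 1) (by omega) (by omega)]
      simp only [dvalMix, dval]
      rw [if_neg (by omega)]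
      by_cases h3 : k = 3
      · subst h3
        rw [show m + 3 - 1 = (m + 1) + 1 by omega, palb_succ cs (m + 1)]
        simp
      · rw [decide_eq_false (by omega : ¬ (m + k - 1 = m + 1 + 1)),
            decide_eq_true (by omega : m + 1 < m + k - 1 ∧ (m + k - 1) - (m + 1) ≤ k - 1)]
        simp
    show ((cs[m]? == cs[m + k - 1]?) && gd dp (m + 1) (m + k - 1)) = _
    rw [hmid, palb_rec cs m (m + k) (by omega) (by omega)]

theorem inner_aux (cs : List Char) (n k : Nat) (hn : cs.length = n) (hk : 1 ≤ k) (hkn : k ≤ n) :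
    ∀ (c m : Nat), m + c = n → ∀ (dp : List (List Bool)) (sa ea : List Nat), Shape n dp →
    (∀ i j, i < n → j ≤ n → gd dp i j = dvalMix cs k m i j) →
    ∃ dp', (List.range' m c).foldl (paInner cs n k) (dp, sa, ea)
      = (dp', sa ++ (if decide (m = 0) && palb cs 0 k then [k] else []),
              ea ++ (if decide (m ≤ n - k) && palb cs (n - k) n then [n - k] else []))
      ∧ Shape n dp' ∧ ∀ i j, i < n → j ≤ n → gd dp' i j = dvalMix cs k n i j := by
  intro c
  induction c with
  | zero =>
    intro m hm dp sa ea hs hdp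
    have hm0 : m = n := by omega
    subst hm0
    refine ⟨dp, ?_, hs, ?_⟩
    · rw [List.range'_zero, List.foldl_nil,
        decide_eq_false (by omega : ¬ (m = 0)), decide_eq_false (by omega : ¬ (m ≤ m - k))]
      simp
    · intro i j hi hj
      exact hdp i j hi hj
  | succ c ih =>
    intro m hm dp sa ea hs hdp
    rw [List.range'_succ, List.foldl_cons]
    by_cases hcase : m + k > n
    · -- Python's 'continue' branch: end > n
      have hpa : paInner cs n k (dp, sa, ea) m = (dp, sa, ea) := by
        simp only [paInner]
        rw [if_pos hcase]
      rw [hpa]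
      have hmix : ∀ i j, i < n → j ≤ n → gd dp i j = dvalMix cs k (m + 1) i j := by
        intro i j hi hj
        rw [hdp i j hi hj]
        simp only [dvalMix]
        by_cases hc : i < m + 1 ∧ j = i + k
        · have hc' : i < m ∧ j = i + k := ⟨by omega, hc.2⟩
          rw [if_pos hc, if_pos hc']
        · have hc' : ¬ (i < m ∧ j = i + k) := fun h => hc ⟨by omega, h.2⟩
          rw [if_neg hc, if_neg hc']
      obtain ⟨dp', heq, hs', hdp'⟩ := ih (m + 1) (by omega) dp sa ea hs hmix
      refine ⟨dp', ?_, hs', hdp'⟩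
      rw [heq,
        decide_eq_false (by omega : ¬ (m = 0)), decide_eq_false (by omega : ¬ (m + 1 = 0)),
        decide_eq_false (by omega : ¬ (m ≤ n - k)), decide_eq_false (by omega : ¬ (m + 1 ≤ n - k))]
    · -- real step: end ≤ n, the table entry (m, m+k) is written
      have he : m + k ≤ n := by omega
      have hmn : m < n := by omega
      have hv := v_eq cs n k m hn hk he dp hs hdp
      have hpa : paInner cs n k (dp, sa, ea) m
          = (dp.set m ((dp.getD m []).set (m + k) (palb cs m (m + k))),
             (if m = 0 && palb cs m (m + k) then sa ++ [m + k] else sa),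
             (if m + k = n && palb cs m (m + k) then ea ++ [m] else ea)) := by
        simp only [paInner]
        rw [if_neg (by omega), hv]
      rw [hpa]
      have hmix : ∀ i j, i < n → j ≤ n →
          gd (dp.set m ((dp.getD m []).set (m + k) (palb cs m (m + k)))) i j = dvalMix cs k (m + 1) i j := by
        intro i j hi hj
        rw [gd_set n dp hs m (m + k) hmn (by omega) _ i j hi]
        simp only [dvalMix]
        by_cases hij : i = m ∧ j = m + k
        · rw [if_pos hij, if_pos ⟨by omega, by omega⟩]
          simp only [dval]
          rw [hij.1, hij.2]
          rw [decide_eq_true (by omega : m < m + k ∧ m + k - m ≤ k)]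
          by_cases h1 : k = 1
          · subst h1
            rw [palb_succ cs m]
            simp
          · rw [decide_eq_false (by omega : ¬ (m + k = m + 1))]
            simp
        · rw [if_neg hij, hdp i j hi hj]
          simp only [dvalMix]
          by_cases hc : i < m + 1 ∧ j = i + k
          · have hc' : i < m ∧ j = i + k := by
              refine ⟨?_, hc.2⟩
              rcases Nat.lt_or_ge i m with h | h
              · exact h
              · exact absurd ⟨by omega, by rw [hc.2]; congr 1; omega⟩ hij
            rw [if_pos hc, if_pos hc']
          · have hc' : ¬ (i < m ∧ j = i + k) := fun h => hc ⟨by omega, h.2⟩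
            rw [if_neg hc, if_neg hc']
      obtain ⟨dp', heq, hs', hdp'⟩ := ih (m + 1) (by omega)
        (dp.set m ((dp.getD m []).set (m + k) (palb cs m (m + k)))) _ _
        (shape_set n dp hs m (m + k) hmn _) hmix
      refine ⟨dp', ?_, hs', hdp'⟩
      rw [heq]
      simp only [Prod.mk.injEq]
      refine ⟨trivial, ?_, ?_⟩
      · -- start_acc component
        by_cases hm0 : m = 0
        · subst hm0
          simp only [Nat.zero_add]
          by_cases hp : palb cs 0 k <;> simp [hp]
        · rw [decide_eq_false hm0, decide_eq_false (by omega : ¬ (m + 1 = 0))]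
          simp [hm0]
      · -- end_acc component
        by_cases hme : m + k = n
        · have hnk : n - k = m := by omega
          rw [hnk, decide_eq_true hme, decide_eq_false (by omega : ¬ (m + 1 ≤ m)),
              decide_eq_true (by omega : m ≤ m)]
          have hpn : palb cs m (m + k) = palb cs m n := by rw [hme]
          rw [hpn]
          by_cases hp : palb cs m n <;> simp [hp]
        · rw [decide_eq_false hme,
              decide_eq_true (by omega : m ≤ n - k), decide_eq_true (by omega : m + 1 ≤ n - k)]
          simp

def saI (cs : List Char) (k : Nat) : List Nat :=
  (List.range' 1 k).filter (fun e => decide (e ≤ cs.length) && palb cs 0 e)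

def eaI (cs : List Char) (k : Nat) : List Nat :=
  (List.range' 1 k).filterMap
    (fun sz => if sz ≤ cs.length && palb cs (cs.length - sz) cs.length then some (cs.length - sz) else none)

theorem init_shape (n : Nat) :
    Shape n ((List.range n).map (fun i => (List.replicate (n + 1) false).set (i + 1) true)) := by
  constructor
  · simp
  · intro r hr
    simp only [List.mem_map] at hr
    obtain ⟨i, _, rfl⟩ := hr
    simp

theorem gd_init (cs : List Char) (n : Nat) (i j : Nat) (hi : i < n) (hj : j ≤ n) :
    gd ((List.range n).map (fun i => (List.replicate (n + 1) false).set (i + 1) true)) i j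
      = dval cs 0 i j := by
  have hrow : ((List.range n).map (fun i => (List.replicate (n + 1) false).set (i + 1) true)).getD i []
      = (List.replicate (n + 1) false).set (i + 1) true := by
    rw [List.getD_eq_getElem _ _ (by simpa using hi)]
    simp
  simp only [gd, hrow, dval]
  rw [decide_eq_false (by omega : ¬ (i < j ∧ j - i ≤ 0)),
    List.getD_eq_getElem _ _ (by simp; omega)]
  by_cases hje : j = i + 1
  · subst hje
    rw [List.getElem_set_self (by simp; omega)]
    simp
  · rw [List.getElem_set_ne (fun h => hje h.symm)]
    simp [hje]

theorem dval_succ_ne (cs : List Char) (k i j : Nat) (h : j ≠ i + (k + 1)) :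
    dval cs (k + 1) i j = dval cs k i j := by
  simp only [dval]
  rw [show (decide (i < j ∧ j - i ≤ k + 1)) = (decide (i < j ∧ j - i ≤ k)) by
    by_cases h1 : i < j ∧ j - i ≤ k
    · rw [decide_eq_true h1, decide_eq_true ⟨h1.1, by omega⟩]
    · by_cases h2 : i < j ∧ j - i ≤ k + 1
      · exact absurd ⟨h2.1, by omega⟩ h1
      · rw [decide_eq_false h1, decide_eq_false h2]]

theorem outer_aux (cs : List Char) (n : Nat) (hn : cs.length = n) :
    ∀ k, k ≤ n → ∃ dp', (List.range' 1 k).foldl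
        (fun st size => (List.range n).foldl (paInner cs n size) st)
        (((List.range n).map (fun i => (List.replicate (n + 1) false).set (i + 1) true)),
          ([] : List Nat), ([] : List Nat))
      = (dp', saI cs k, eaI cs k)
      ∧ Shape n dp' ∧ ∀ i j, i < n → j ≤ n → gd dp' i j = dval cs k i j := by
  intro k
  induction k with
  | zero =>
    intro _
    refine ⟨_, ?_, init_shape n, fun i j hi hj => gd_init cs n i j hi hj⟩
    simp [saI, eaI]
  | succ k ih =>
    intro hk1
    obtain ⟨dp', heq, hs', hdp'⟩ := ih (by omega)
    rw [List.range'_concat, List.foldl_append, heq, List.foldl_cons, List.foldl_nil,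
      show 1 + 1 * k = k + 1 from by omega, List.range_eq_range']
    have hmix : ∀ i j, i < n → j ≤ n → gd dp' i j = dvalMix cs (k + 1) 0 i j := by
      intro i j hi hj
      rw [hdp' i j hi hj]
      simp only [dvalMix]
      rw [if_neg (by omega), Nat.add_sub_cancel]
    obtain ⟨dp'', heq'', hs'', hdp''⟩ :=
      inner_aux cs n (k + 1) hn (by omega) (by omega) n 0 (by omega) dp' (saI cs k) (eaI cs k) hs' hmix
    have hsa : saI cs (k + 1) = saI cs k ++ (if palb cs 0 (k + 1) then [k + 1] else []) := by
      simp only [saI]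
      rw [List.range'_concat, List.filter_append, show 1 + 1 * k = k + 1 from by omega]
      congr 1
      simp only [List.filter_cons, List.filter_nil]
      rw [decide_eq_true (show k + 1 ≤ cs.length from by omega)]
      simp
    have hea : eaI cs (k + 1) = eaI cs k ++ (if palb cs (n - (k + 1)) n then [n - (k + 1)] else []) := by
      simp only [eaI, hn]
      rw [List.range'_concat, List.filterMap_append, show 1 + 1 * k = k + 1 from by omega]
      congr 1
      simp only [List.filterMap_cons, List.filterMap_nil]
      rw [decide_eq_true (show k + 1 ≤ n from by omega)]
      by_cases hp : palb cs (n - (k + 1)) n <;> simp [hp]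
    refine ⟨dp'', ?_, hs'', ?_⟩
    · rw [heq'', hsa, hea]
      simp
    · intro i j hi hj
      rw [hdp'' i j hi hj]
      simp only [dvalMix]
      by_cases hc : j = i + (k + 1)
      · rw [if_pos ⟨hi, hc⟩]
      · rw [if_neg (fun h => hc h.2), Nat.add_sub_cancel, dval_succ_ne cs k i j hc]

theorem mem_saI (cs : List Char) (k a : Nat) :
    a ∈ saI cs k ↔ (1 ≤ a ∧ a ≤ k ∧ a ≤ cs.length ∧ palb cs 0 a = true) := by
  simp only [saI, List.mem_filter, List.mem_range'_1, Bool.and_eq_true, decide_eq_true_eq]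
  constructor
  · rintro ⟨⟨h1, h2⟩, h3, h4⟩
    exact ⟨h1, by omega, h3, h4⟩
  · rintro ⟨h1, h2, h3, h4⟩
    exact ⟨⟨h1, by omega⟩, h3, h4⟩

theorem mem_eaI (cs : List Char) (k x : Nat) (hkn : k ≤ cs.length) :
    x ∈ eaI cs k ↔ (cs.length - k ≤ x ∧ x < cs.length ∧ palb cs x cs.length = true) := by
  simp only [eaI, List.mem_filterMap, List.mem_range'_1, Bool.and_eq_true, decide_eq_true_eq]
  constructor
  · rintro ⟨sz, ⟨h1, h2⟩, h3⟩
    rw [Option.ite_none_right_eq_some, Option.some.injEq] at h3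
    obtain ⟨⟨h4, h5⟩, rfl⟩ := h3
    refine ⟨by omega, by omega, h5⟩
  · rintro ⟨h1, h2, h3⟩
    refine ⟨cs.length - x, ⟨by omega, by omega⟩, ?_⟩
    rw [Option.ite_none_right_eq_some, Option.some.injEq]
    have hx : cs.length - (cs.length - x) = x := by omega
    exact ⟨⟨by omega, by rw [hx]; exact h3⟩, hx⟩

theorem palb_take (cs : List Char) (i : Nat) : palb cs 0 i = isPalB (cs.take i) := by
  simp [palb, seg]

theorem palb_drop (cs : List Char) (j : Nat) : palb cs j cs.length = isPalB (cs.drop j) := by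
  simp only [palb, seg]
  rw [← List.length_drop, List.take_length]

theorem a_iff (s : String) :
    checkPartitioning s = true ↔ ∃ i j, 1 ≤ i ∧ i < j ∧ j < s.toList.length ∧
      palb s.toList 0 i = true ∧ palb s.toList i j = true ∧ palb s.toList j s.toList.length = true := by
  obtain ⟨dp', heq, hs', hdp'⟩ := outer_aux s.toList s.toList.length rfl s.toList.length (le_refl _)
  simp only [checkPartitioning]
  rw [heq]
  simp only [List.any_eq_true]
  constructor
  · rintro ⟨a, ha, e, he, hgd⟩
    rw [mem_saI] at ha
    rw [mem_eaI _ _ _ (le_refl _)] at he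
    obtain ⟨ha1, ha2, ha3, ha4⟩ := ha
    obtain ⟨he1, he2, he3⟩ := he
    by_cases han : a < s.toList.length
    · have := hdp' a e han (by omega)
      simp only [gd] at this
      rw [this] at hgd
      simp only [dval, Bool.or_eq_true, Bool.and_eq_true, decide_eq_true_eq] at hgd
      rcases hgd with h | ⟨⟨h1, h2⟩, h3⟩
      · subst h
        exact ⟨a, a + 1, ha1, by omega, by omega, ha4, palb_succ s.toList a, he3⟩
      · exact ⟨a, e, ha1, h1, he2, ha4, h3, he3⟩
    · exfalso
      have hl : (dp'.getD a []) = [] :=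
        List.getD_eq_default _ _ (by rw [hs'.1]; omega)
      rw [hl] at hgd
      simp at hgd
  · rintro ⟨i, j, h1, h2, h3, h4, h5, h6⟩
    refine ⟨i, ?_, j, ?_, ?_⟩
    · rw [mem_saI]
      exact ⟨h1, by omega, by omega, h4⟩
    · rw [mem_eaI _ _ _ (le_refl _)]
      exact ⟨by omega, h3, h6⟩
    · have := hdp' i j (by omega) (by omega)
      simp only [gd] at this
      rw [this]
      simp only [dval, Bool.or_eq_true, Bool.and_eq_true, decide_eq_true_eq]
      exact Or.inr ⟨⟨h2, by omega⟩, h5⟩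

theorem b_iff (s : String) :
    checkPartitioning_alt s = true ↔ ∃ i j, 1 ≤ i ∧ i < j ∧ j < s.toList.length ∧
      palb s.toList 0 i = true ∧ palb s.toList i j = true ∧ palb s.toList j s.toList.length = true := by
  simp only [checkPartitioning_alt, List.any_eq_true, List.mem_range'_1, Bool.and_eq_true]
  constructor
  · rintro ⟨i, ⟨hi1, hi2⟩, j, ⟨hj1, hj2⟩, ⟨hb1, hb2⟩, hb3⟩
    refine ⟨i, j, hi1, by omega, by omega, ?_, ?_, ?_⟩
    · rw [palb_take]; exact hb1
    · exact hb2
    · rw [palb_drop]; exact hb3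
  · rintro ⟨i, j, h1, h2, h3, h4, h5, h6⟩
    refine ⟨i, ⟨h1, by omega⟩, j, ⟨by omega, by omega⟩, ⟨?_, h5⟩, ?_⟩
    · rw [← palb_take]; exact h4
    · rw [← palb_drop]; exact h6

theorem ab_eq (s : String) : checkPartitioning s = checkPartitioning_alt s := by
  by_cases hx : checkPartitioning s = true
  · rw [hx, (b_iff s).mpr ((a_iff s).mp hx)]
  · have hy : ¬ checkPartitioning_alt s = true := fun hy => hx ((a_iff s).mpr ((b_iff s).mp hy))
    rw [Bool.not_eq_true] at hx hy
    rw [hx, hy]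


-- ===== VERDICT (by name: the statement is the Claim_ definition above) =====
theorem checkPartitioning_spec : Claim_equal_checkPartitioning := by
  intro s _ _
  unfold Spec_checkPartitioning
  exact ab_eq s
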